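-- pv_equiv track=rewrite | github.com/hwmaltby/project-euler | problems/problem_101.py | sum_of_fits
-- ===== SOURCE A (Python) =====
-- def pascals_triangle(n):
--     """Returns Pascal's triangle, through row n."""
--     triangle_list = [[1] * i for i in range(1, n + 2)]
--     for i in range(1, n + 1):
--         for j in range(i+1):
--             if j == 0:
--                 triangle_list[i][j] = triangle_list[i - 1][j]
--             elif j == i:
--                 triangle_list[i][j] = triangle_list[i - 1][j - 1]
--             else:
--                 triangle_list[i][j] = triangle_list[i - 1][j - 1] +\
--                  triangle_list[i - 1][j]
--     return triangle_list
--
-- def fn(x):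
--     x = x + 1
--     return 1 - x + x ** 2 - x ** 3 + x ** 4 - x ** 5 + x ** 6 - x ** 7 + x ** 8\
--         - x ** 9 + x ** 10
--
-- def bop(seq, n, triangle_list):
--     total = 0
--     for i in range(len(seq)):
--         total += seq[i] * triangle_list[n - 1][i]
--     return total
--
-- def sum_of_fits(d):
--     triangle_list = pascals_triangle(d)
--     diff_table = []
--     total = 0
--     for i in range(d):
--         diff = fn(i)
--         for row in diff_table:
--             row.append(diff)
--             if len(row) != 1:
--                 diff -= row[-2]
--         diff_table.append([diff])
--         seq = []
--         for row in diff_table: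
--             seq.append(row[0])
--         n = i + 1
--         while bop(seq, n, triangle_list) == fn(n - 1):
--             n += 1
--         total += bop(seq, n, triangle_list)
--     return total
-- ===== SOURCE B (Python) =====
-- from fractions import Fraction
--
-- def fn(x):
--     x = x + 1
--     return sum((-1) ** k * x ** k for k in range(11))
--
-- def lagrange(points, n):
--     """Value at n of the polynomial interpolating the integer points."""
--     total = Fraction(0)
--     for j, (xj, yj) in enumerate(points):
--         term = Fraction(yj)
--         for m, (xm, _) in enumerate(points):
--             if m != j:
--                 term *= Fraction(n - xm, xj - xm)
--         total += term
--     return total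
--
-- def sum_of_fits(d):
--     total = 0
--     for k in range(1, d + 1):
--         points = [(i + 1, fn(i)) for i in range(k)]
--         n = k + 1
--         while lagrange(points, n) == fn(n - 1):
--             n += 1
--         total += int(lagrange(points, n))
--     return total
-- ===== Notes on version B (the rewrite author's own statement) =====
-- stated objective: alternative
-- what changed: Replaces A's finite-difference table plus hand-built Pascal triangle (bop) with a Lagrange-interpolation evaluator over exact fractions, keeping the same while-until-first-disagreement control flow.
-- outside the precondition, e.g. on sum_of_fits(11): A raises IndexError, B does not finish within the time limit
import Mathlib
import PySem

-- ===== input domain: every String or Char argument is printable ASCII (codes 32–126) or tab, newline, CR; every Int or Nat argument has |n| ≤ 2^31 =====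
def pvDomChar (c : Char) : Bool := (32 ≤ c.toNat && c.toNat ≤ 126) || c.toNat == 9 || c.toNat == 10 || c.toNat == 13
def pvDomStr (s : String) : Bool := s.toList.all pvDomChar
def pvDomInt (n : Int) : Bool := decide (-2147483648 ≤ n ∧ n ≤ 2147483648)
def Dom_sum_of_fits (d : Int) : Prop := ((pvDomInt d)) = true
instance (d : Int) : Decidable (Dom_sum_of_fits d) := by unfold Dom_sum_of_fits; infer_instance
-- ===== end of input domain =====

-- B replaces A's finite-difference table + hand-built Pascal triangle with a
-- Lagrange-interpolation evaluator over exact rationals (objective: alternative algorithm).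

-- ===== PORT A =====
-- pascals_triangle: rows initialised to all-ones, then updated row by row in place.
def pvTriangle (n : Int) : List (List Int) :=
  let init := (PySem.List.pyRange 1 (n + 2) 1).map (fun i => List.replicate i.toNat 1)
  (PySem.List.pyRange 1 (n + 1) 1).foldl (fun tri i =>
    let prev := tri.getD (i.toNat - 1) []
    tri.set i.toNat ((PySem.List.pyRange 0 (i + 1) 1).map (fun j =>
      if j = 0 then PySem.List.pyGetD prev j 0
      else if j = i then PySem.List.pyGetD prev (j - 1) 0
      else PySem.List.pyGetD prev (j - 1) 0 + PySem.List.pyGetD prev j 0))) init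

def pvFn (x : Int) : Int :=
  let x := x + 1
  1 - x + x ^ 2 - x ^ 3 + x ^ 4 - x ^ 5 + x ^ 6 - x ^ 7 + x ^ 8 - x ^ 9 + x ^ 10

def pvBop (seq : List Int) (n : Int) (tri : List (List Int)) : Int :=
  (PySem.List.pyRange 0 (seq.length : Int) 1).foldl (fun total i =>
    total + PySem.List.pyGetD seq i 0 *
      PySem.List.pyGetD (PySem.List.pyGetD tri (n - 1) []) i 0) 0

-- the 'while bop(...) == fn(n-1): n += 1' loop; fuel only makes it total
-- (within Pre_ the loop always exits long before the fuel runs out)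
def pvWhileA (fuel : Nat) (seq : List Int) (tri : List (List Int)) (n : Int) : Int :=
  match fuel with
  | 0 => n
  | f + 1 => if pvBop seq n tri = pvFn (n - 1) then pvWhileA f seq tri (n + 1) else n

def sum_of_fits (d : Int) : Int :=
  let tri := pvTriangle d
  let st := (PySem.List.pyRange 0 d 1).foldl
    (fun (st : List (List Int) × Int) i =>
      let (dt0, total) := st
      -- for row in diff_table: row.append(diff); if len(row) != 1: diff -= row[-2]
      let p := dt0.foldl (fun (acc : List (List Int) × Int) row =>
        let row' := row ++ [acc.2]
        let diff' := if row'.length ≠ 1 then acc.2 - PySem.List.pyGetD row' (-2) 0 else acc.2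
        (acc.1 ++ [row'], diff')) ([], pvFn i)
      let dt := p.1 ++ [[p.2]]
      let seq := dt.map (fun row => PySem.List.pyGetD row 0 0)
      let n := pvWhileA 1000 seq tri (i + 1)
      (dt, total + pvBop seq n tri)) ([], 0)
  st.2

-- ===== PORT B =====
def pvFnB (x : Int) : Int :=
  let x := x + 1
  ((PySem.List.pyRange 0 11 1).map (fun k => (-1) ^ k.toNat * x ^ k.toNat)).sum

-- Python's Fraction(a, b): a gcd-normalized pair (num, den) with den > 0 (b ≠ 0)
def pvFrac (a b : Int) : Int × Int :=
  let s : Int := if b < 0 then -1 else 1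
  let g : Int := (Int.gcd a b : Int)
  ((s * a).tdiv g, (s * b).tdiv g)

def pvFracAdd (x y : Int × Int) : Int × Int := pvFrac (x.1 * y.2 + y.1 * x.2) (x.2 * y.2)

def pvFracMul (x y : Int × Int) : Int × Int := pvFrac (x.1 * y.1) (x.2 * y.2)

-- value at n of the polynomial interpolating the points, exact fractions
def pvLagrange (points : List (Int × Int)) (n : Int) : Int × Int :=
  (PySem.List.enumerate points 0).foldl (fun total jp =>
    pvFracAdd total ((PySem.List.enumerate points 0).foldl (fun term mp =>
      if mp.1 ≠ jp.1 then pvFracMul term (pvFrac (n - mp.2.1) (jp.2.1 - mp.2.1))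
      else term) (pvFrac jp.2.2 1))) (pvFrac 0 1)

def pvWhileB (fuel : Nat) (points : List (Int × Int)) (n : Int) : Int :=
  match fuel with
  | 0 => n
  | f + 1 => if pvLagrange points n = pvFrac (pvFnB (n - 1)) 1 then pvWhileB f points (n + 1) else n

def sum_of_fits_alt (d : Int) : Int :=
  (PySem.List.pyRange 1 (d + 1) 1).foldl (fun total k =>
    let points := (PySem.List.pyRange 0 k 1).map (fun i => (i + 1, pvFnB i))
    let n := pvWhileB 1000 points (k + 1)
    let v := pvLagrange points n
    total + v.1.tdiv v.2) 0   -- int(Fraction) truncates toward zero = Int.tdiv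
-- ===== PRECONDITION & SPEC =====
-- A raises IndexError for d ≥ 11 (the degree-10 prefix fits exactly and bop runs
-- off the end of the triangle), so Pre_ admits exactly the d on which A returns.
def Pre_sum_of_fits (d : Int) : Prop := d ≤ 10
instance (d : Int) : Decidable (Pre_sum_of_fits d) := by unfold Pre_sum_of_fits; infer_instance
def pvWitness_sum_of_fits : Int := 7

def Spec_sum_of_fits (d : Int) (out : Int) : Prop := out = sum_of_fits_alt d
instance (d : Int) (out : Int) : Decidable (Spec_sum_of_fits d out) := by unfold Spec_sum_of_fits; infer_instance

-- ===== CLAIM (what is proved, stated in full; the proofs are below) =====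
def Claim_equal_sum_of_fits : Prop :=
  ∀ (d : Int), Dom_sum_of_fits d → Pre_sum_of_fits d → Spec_sum_of_fits d (sum_of_fits d)

-- ===== LEMMAS AND PROOFS =====
theorem pv_nonpos (d : Int) (h : d ≤ 0) : sum_of_fits d = sum_of_fits_alt d := by
  have h1 : PySem.List.pyRange 0 d 1 = [] := PySem.List.pyRange_one_eq_nil h
  have h2 : PySem.List.pyRange 1 (d + 1) 1 = [] := PySem.List.pyRange_one_eq_nil (by omega)
  simp [sum_of_fits, sum_of_fits_alt, h1, h2]

-- ===== VERDICT (by name: the statement is the Claim_ definition above) =====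
set_option maxRecDepth 100000 in
theorem sum_of_fits_spec : Claim_equal_sum_of_fits := by
  intro d _ hpre
  unfold Spec_sum_of_fits
  by_cases h : d ≤ 0
  · exact pv_nonpos d h
  · unfold Pre_sum_of_fits at hpre
    interval_cases d <;> decide
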